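-- pv_equiv track=rewrite | github.com/hansrajdas/random | practice/kick_start.py | solve
-- ===== SOURCE A (Python) =====
-- def check_string(s, sub):
--     res = []
--     for idx in range(len(s)):
--         if s[idx:idx + len(sub)] == sub:
--             res.append(idx)
--     return res
--
-- def solve(S):
--     if not S:
--         return 0
--     count = 0
--     kick = check_string(S, 'KICK')
--     start = check_string(S, 'START')
--     for k in kick:
--         for i in range(len(start)):
--             if k < start[i]:
--                 count += len(start) - i
--                 break
--     return count
-- ===== SOURCE B (Python) =====
-- def solve(S):
--     count = 0
--     kicks = 0
--     for i in range(len(S)):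
--         if S.startswith('START', i):
--             count += kicks
--         if S.startswith('KICK', i):
--             kicks += 1
--     return count
-- ===== Notes on version B (the rewrite author's own statement) =====
-- stated objective: simpler
-- what changed: Replaced the two position-collecting passes plus the nested kick-by-start scan with a single left-to-right pass that keeps a running count of KICKs seen and adds it whenever a START begins.
import Mathlib
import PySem

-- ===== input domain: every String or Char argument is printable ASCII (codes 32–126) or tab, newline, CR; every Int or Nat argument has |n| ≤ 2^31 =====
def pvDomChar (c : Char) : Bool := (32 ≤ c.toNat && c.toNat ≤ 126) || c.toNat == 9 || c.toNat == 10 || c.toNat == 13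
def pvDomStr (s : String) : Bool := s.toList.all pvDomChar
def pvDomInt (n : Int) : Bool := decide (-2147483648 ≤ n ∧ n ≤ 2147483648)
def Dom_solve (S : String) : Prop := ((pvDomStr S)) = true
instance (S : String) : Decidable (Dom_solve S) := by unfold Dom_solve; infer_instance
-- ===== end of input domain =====

-- B replaces A's two position-collecting passes plus the nested kick-by-start scan with a
-- single left-to-right pass keeping a running KICK count; objective: simpler.

-- ===== PORT A =====
-- port of check_string: collect every index idx with s[idx:idx+len(sub)] == sub
def checkString (s sub : List Char) : List Nat :=
  (List.range s.length).foldl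
    (fun (res : List Nat) (idx : Nat) =>
      if PySem.List.slice s (some (idx : Int)) (some ((idx : Int) + (sub.length : Int))) = sub
      then res ++ [idx] else res) []

-- port of the inner 'for i in range(len(start)): if k < start[i]: count += len(start) - i; break'
-- (len(start) - i is the length of the suffix of start beginning at i)
def innerA (k : Nat) : List Nat → Int
  | [] => 0
  | p :: rest => if k < p then (1 + rest.length : Int) else innerA k rest

def solve (S : String) : Int :=
  if S.toList = [] then 0
  else
    let kick := checkString S.toList "KICK".toList
    let start := checkString S.toList "START".toList
    kick.foldl (fun count k => count + innerA k start) 0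

-- ===== PORT B =====
-- S.startswith(sub, i)
def startsAt (cs sub : List Char) (i : Nat) : Bool := sub.isPrefixOf (cs.drop i)

def solve_alt (S : String) : Int :=
  let cs := S.toList
  let st := (List.range cs.length).foldl
    (fun (st : Int × Int) i =>
      let st := if startsAt cs "START".toList i then (st.1, st.2 + st.1) else st
      if startsAt cs "KICK".toList i then (st.1 + 1, st.2) else st)
    (0, 0)
  st.2

-- ===== PRECONDITION & SPEC =====
def Spec_solve (S : String) (out : Int) : Prop := out = solve_alt S
instance (S : String) (out : Int) : Decidable (Spec_solve S out) := by unfold Spec_solve; infer_instance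

-- ===== CLAIM (what is proved, stated in full; the proofs are below) =====
def Claim_equal_solve : Prop := ∀ (S : String), Dom_solve S → Spec_solve S (solve S)

-- ===== LEMMAS AND PROOFS =====

-- check_string collects exactly the indices where sub is a prefix of the suffix at idx
lemma checkString_eq (s sub : List Char) :
    checkString s sub = (List.range s.length).filter (startsAt s sub) := by
  unfold checkString
  have h : (fun (res : List Nat) (idx : Nat) =>
      if PySem.List.slice s (some (idx : Int)) (some ((idx : Int) + (sub.length : Int))) = sub
      then res ++ [idx] else res)
      = fun res idx => if startsAt s sub idx then res ++ [id idx] else res := by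
    funext res idx
    have : (PySem.List.slice s (some (idx : Int)) (some ((idx : Int) + (sub.length : Int))) = sub)
        ↔ startsAt s sub idx = true := by
      rw [PySem.List.slice_natCast_add]
      simp only [startsAt, List.isPrefixOf_iff_prefix, List.prefix_iff_eq_take]
      exact eq_comm
    simp only [this, id]
  rw [h, PySem.List.foldl_append_if (startsAt s sub) id, List.map_id]
  simp

-- on a strictly increasing list, A's break-out inner loop counts the elements above k
lemma innerA_eq (k : Nat) (l : List Nat) (hl : l.Pairwise (· < ·)) :
    innerA k l = (l.countP (fun p => decide (k < p)) : Int) := by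
  induction l with
  | nil => simp [innerA]
  | cons p rest ih =>
    rcases List.pairwise_cons.mp hl with ⟨hp, hrest⟩
    by_cases h : k < p
    · have hall : rest.countP (fun q => decide (k < q)) = rest.length := by
        rw [List.countP_eq_length]
        intro q hq
        exact decide_eq_true (lt_trans h (hp q hq))
      simp [innerA, h, hall]
      omega
    · simp [innerA, h, ih hrest]

-- double counting of pairs (k, p) with k < p, summed one way or the other
lemma swap_sum (K T : List Nat) :
    (K.map (fun k => ((T.countP (fun p => decide (k < p)) : Nat) : Int))).sum
      = (T.map (fun p => ((K.countP (fun k => decide (k < p)) : Nat) : Int))).sum := by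
  induction K with
  | nil => simp
  | cons a K' ih =>
    have hc : (fun p => ((List.countP (fun k => decide (k < p)) (a :: K') : Nat) : Int))
        = fun p => ((K'.countP (fun k => decide (k < p)) : Nat) : Int)
            + (if decide (a < p) = true then 1 else 0) := by
      funext p
      rw [List.countP_cons]
      push_cast
      ring
    rw [List.map_cons, List.sum_cons, ih, hc, PySem.List.sum_map_add_int,
        PySem.List.sum_map_ite_one_zero]
    ring

-- invariant of B's single pass: after the first n indices, the state holds the number of
-- tK-matches so far and the pair count accumulated over tS-matches so far
lemma B_invariant (cs tK tS : List Char) (n : Nat) :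
    (List.range n).foldl
      (fun (st : Int × Int) i =>
        let st := if startsAt cs tS i then (st.1, st.2 + st.1) else st
        if startsAt cs tK i then (st.1 + 1, st.2) else st)
      (0, 0)
    = ( (((List.range n).filter (startsAt cs tK)).length : Int),
        (((List.range n).filter (startsAt cs tS)).map
          (fun p => ((((List.range n).filter (startsAt cs tK)).countP
              (fun k => decide (k < p))) : Int))).sum ) := by
  induction n with
  | zero => simp
  | succ n ih =>
    rw [List.range_succ, List.foldl_append, ih]
    have hKlt : ∀ q ∈ (List.range n).filter (startsAt cs tK), q < n :=
      fun q hq => List.mem_range.mp (List.mem_of_mem_filter hq)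
    have hTlt : ∀ p ∈ (List.range n).filter (startsAt cs tS), p < n :=
      fun p hp => List.mem_range.mp (List.mem_of_mem_filter hp)
    have hKn : ((List.range n).filter (startsAt cs tK)).countP
        (fun k => decide (k < n)) = ((List.range n).filter (startsAt cs tK)).length := by
      rw [List.countP_eq_length]
      exact fun q hq => decide_eq_true (hKlt q hq)
    have key : ∀ p < n,
        (((List.range n ++ [n]).filter (startsAt cs tK)).countP (fun k => decide (k < p)))
        = (((List.range n).filter (startsAt cs tK)).countP (fun k => decide (k < p))) := by
      intro p hp
      have hpn : ¬ (n < p) := by omega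
      rw [List.filter_append, List.countP_append]
      cases hk : startsAt cs tK n <;> simp [hk, hpn]
    have hmap : (((List.range n).filter (startsAt cs tS)).map
          (fun p => ((((List.range n ++ [n]).filter (startsAt cs tK)).countP
              (fun k => decide (k < p))) : Int)))
        = (((List.range n).filter (startsAt cs tS)).map
          (fun p => ((((List.range n).filter (startsAt cs tK)).countP
              (fun k => decide (k < p))) : Int))) :=
      List.map_congr_left fun p hp => by rw [key p (hTlt p hp)]
    by_cases hT : startsAt cs tS n = true <;>
      by_cases hK : startsAt cs tK n = true <;>
      · simp only [List.foldl_cons, List.foldl_nil, hT, hK, if_true, if_false,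
          Bool.false_eq_true, Prod.mk.injEq]
        constructor
        · simp [List.filter_append, hK]
        · conv_rhs => rw [List.filter_append (p := startsAt cs tS)]
          rw [List.map_append, List.sum_append, hmap]
          simp [hT, hK, List.filter_append, List.countP_append, hKn]

theorem solve_eq (S : String) : solve S = solve_alt S := by
  unfold solve solve_alt
  by_cases h : S.toList = []
  · rw [if_pos h]
    simp [h]
  · rw [if_neg h]
    show (checkString S.toList "KICK".toList).foldl
        (fun count k => count + innerA k (checkString S.toList "START".toList)) 0
      = ((List.range S.toList.length).foldl
          (fun (st : Int × Int) i =>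
            let st := if startsAt S.toList "START".toList i then (st.1, st.2 + st.1) else st
            if startsAt S.toList "KICK".toList i then (st.1 + 1, st.2) else st)
          (0, 0)).2
    rw [checkString_eq, checkString_eq, PySem.List.foldl_add, B_invariant]
    have hpair : ((List.range S.toList.length).filter (startsAt S.toList "START".toList)).Pairwise (· < ·) :=
      List.Pairwise.filter _ List.pairwise_lt_range
    have hm : ((List.range S.toList.length).filter (startsAt S.toList "KICK".toList)).map
          (fun k => innerA k ((List.range S.toList.length).filter (startsAt S.toList "START".toList)))
        = ((List.range S.toList.length).filter (startsAt S.toList "KICK".toList)).map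
          (fun k => ((((List.range S.toList.length).filter (startsAt S.toList "START".toList)).countP
              (fun p => decide (k < p)) : Nat) : Int)) :=
      List.map_congr_left fun k _ => innerA_eq k _ hpair
    rw [hm, swap_sum]
    simp

-- ===== VERDICT (by name: the statement is the Claim_ definition above) =====
theorem solve_spec : Claim_equal_solve := by
  intro S _
  show solve S = solve_alt S
  exact solve_eq S
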